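-- pv_equiv track=rewrite | github.com/NatriClorua/funtion- | funtion.py | dao_nguoc_vtri_chan
-- ===== SOURCE A (Python) =====
-- def dao_nguoc_vtri_chan(arr):
--     chan_arr = []
--     for i in range (len(arr)):
--         if i %2 ==0:
--             chan_arr.append(arr[i])
--     chan_arr.reverse()
--     kq = []
--     chan_index =0
--     for i in range (len(arr)):
--         if i %2 ==0:
--             kq.append(chan_arr[chan_index])
--             chan_index +=1
--         else:
--             kq.append(arr[i])
--     return kq
-- ===== SOURCE B (Python) =====
-- def dao_nguoc_vtri_chan(arr):
--     kq = list(arr)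
--     i = 0
--     j = len(arr) - 1 if len(arr) % 2 == 1 else len(arr) - 2
--     while i < j:
--         kq[i], kq[j] = kq[j], kq[i]
--         i += 2
--         j -= 2
--     return kq
-- ===== Notes on version B (the rewrite author's own statement) =====
-- stated objective: alternative
-- what changed: B copies the input once and reverses the even-index elements in place with two converging index pointers (swap kq[i] and kq[j], i += 2, j -= 2) instead of collecting the even-index elements into a list, reversing it, and rebuilding the output element by element with a running counter.
import Mathlib
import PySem

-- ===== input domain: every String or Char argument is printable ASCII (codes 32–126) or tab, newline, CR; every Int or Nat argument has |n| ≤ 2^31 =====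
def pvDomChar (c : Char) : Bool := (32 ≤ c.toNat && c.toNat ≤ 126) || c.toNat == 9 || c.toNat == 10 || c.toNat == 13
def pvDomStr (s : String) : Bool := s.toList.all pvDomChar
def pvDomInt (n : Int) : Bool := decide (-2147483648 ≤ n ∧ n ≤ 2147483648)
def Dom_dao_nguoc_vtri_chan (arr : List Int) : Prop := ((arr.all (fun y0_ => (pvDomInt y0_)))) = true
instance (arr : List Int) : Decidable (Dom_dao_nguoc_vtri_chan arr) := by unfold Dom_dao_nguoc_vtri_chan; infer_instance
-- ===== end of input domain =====

-- B reverses the even-index elements with two converging pointers on a copy of the input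
-- instead of A's collect/reverse/rebuild; alternative decomposition, same linear cost.

-- ===== PORT A =====
def dao_nguoc_vtri_chan (arr : List Int) : List Int :=
  let chan_arr :=
    (PySem.List.pyRange 0 arr.length 1).foldl
      (fun acc i => if i % 2 == 0 then acc ++ [PySem.List.pyGetD arr i 0] else acc) []
  let chan_rev := chan_arr.reverse
  let st :=
    (PySem.List.pyRange 0 arr.length 1).foldl
      (fun (st : List Int × Int) i =>
        if i % 2 == 0 then (st.1 ++ [PySem.List.pyGetD chan_rev st.2 0], st.2 + 1)
        else (st.1 ++ [PySem.List.pyGetD arr i 0], st.2)) ([], 0)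
  st.1

-- ===== PORT B =====
-- the while loop of Source B: swap kq[i] and kq[j], i += 2, j -= 2, until i >= j
def pvSwapLoop (kq : List Int) (i j : Int) : List Int :=
  if i < j then
    pvSwapLoop
      (PySem.List.pySetD (PySem.List.pySetD kq i (PySem.List.pyGetD kq j 0)) j
        (PySem.List.pyGetD kq i 0)) (i + 2) (j - 2)
  else kq
termination_by (j - i).toNat
decreasing_by omega

def dao_nguoc_vtri_chan_alt (arr : List Int) : List Int :=
  let j : Int := if arr.length % 2 == 1 then (arr.length : Int) - 1 else (arr.length : Int) - 2
  pvSwapLoop arr 0 j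

-- ===== PRECONDITION & SPEC =====
def Spec_dao_nguoc_vtri_chan (arr : List Int) (out : List Int) : Prop := out = dao_nguoc_vtri_chan_alt arr
instance (arr : List Int) (out : List Int) : Decidable (Spec_dao_nguoc_vtri_chan arr out) := by unfold Spec_dao_nguoc_vtri_chan; infer_instance

-- ===== CLAIM (what is proved, stated in full; the proofs are below) =====
def Claim_equal_dao_nguoc_vtri_chan : Prop := ∀ (arr : List Int), Dom_dao_nguoc_vtri_chan arr → Spec_dao_nguoc_vtri_chan arr (dao_nguoc_vtri_chan arr)

-- ===== LEMMAS AND PROOFS =====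

-- the last even index of a list of length n (meaningful for n ≥ 1)
def pvM (n : Nat) : Nat := if n % 2 = 1 then n - 1 else n - 2

-- common specification: even positions hold arr reflected about pvM, odd positions unchanged
def pvSpec (arr : List Int) : List Int :=
  (List.range arr.length).map
    (fun k => if k % 2 = 0 then arr.getD (pvM arr.length - k) 0 else arr.getD k 0)

-- ---- B side ----

theorem pvSwapLoop_length (kq : List Int) (i j : Int) :
    (pvSwapLoop kq i j).length = kq.length := by
  induction kq, i, j using pvSwapLoop.induct with
  | case1 kq i j hij ih =>
    rw [pvSwapLoop, if_pos hij]
    rw [ih]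
    by_cases hi : 0 ≤ i <;> by_cases hj : 0 ≤ j <;>
      simp [PySem.List.pySetD, PySem.List.pySet?, PySem.List.pyIdx?] <;> split_ifs <;> simp
  | case2 kq i j hij => rw [pvSwapLoop, if_neg hij]

theorem pvSwapLoop_char (arr : List Int) (m : Int) (hm2 : m % 2 = 0)
    (hmn : m < (arr.length : Int))
    (hev : ∀ k : Nat, k < arr.length → k % 2 = 0 → (k : Int) ≤ m) :
    ∀ (kq : List Int) (i j : Int), kq.length = arr.length → 0 ≤ i → i % 2 = 0 → i + j = m →
    (∀ k : Nat, k < arr.length →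
        kq.getD k 0 = if k % 2 = 0 ∧ ((k : Int) < i ∨ j < (k : Int))
          then arr.getD (m - k).toNat 0 else arr.getD k 0) →
    ∀ k : Nat, k < arr.length →
      (pvSwapLoop kq i j).getD k 0 = if k % 2 = 0 then arr.getD (m - k).toNat 0 else arr.getD k 0 := by
  intro kq i j
  induction kq, i, j using pvSwapLoop.induct with
  | case2 kq i j hij =>
    intro hlen hi0 hi2 hsum hkq k hk
    rw [pvSwapLoop, if_neg hij]
    rw [hkq k hk]
    by_cases hke : k % 2 = 0
    · by_cases hc : (k : Int) < i ∨ j < (k : Int)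
      · simp [hke, hc]
      · have : (m - (k:Int)).toNat = k := by omega
        simp [hke, hc, this]
    · simp [hke]
  | case1 kq i j hij ih =>
    intro hlen hi0 hi2 hsum hkq k hk
    have hjlt : j < (arr.length : Int) := by omega
    have hj0 : 0 ≤ j := by omega
    have hiltn : i < (arr.length : Int) := by omega
    have hj2 : j % 2 = 0 := by omega
    rw [pvSwapLoop, if_pos hij]
    set kq' := PySem.List.pySetD (PySem.List.pySetD kq i (PySem.List.pyGetD kq j 0)) j
        (PySem.List.pyGetD kq i 0) with hkq'def
    have hlen' : kq'.length = arr.length := by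
      rw [hkq'def, PySem.List.pySetD_of_nonneg _ _ hj0, PySem.List.pySetD_of_nonneg _ _ hi0]
      simp [hlen]
    have hvi : kq.getD i.toNat 0 = arr.getD i.toNat 0 := by
      have hni : ¬ (i.toNat % 2 = 0 ∧ ((i.toNat : Int) < i ∨ j < (i.toNat : Int))) := by omega
      rw [hkq i.toNat (by omega), if_neg hni]
    have hvj : kq.getD j.toNat 0 = arr.getD j.toNat 0 := by
      have hnj : ¬ (j.toNat % 2 = 0 ∧ ((j.toNat : Int) < i ∨ j < (j.toNat : Int))) := by omega
      rw [hkq j.toNat (by omega), if_neg hnj]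
    have hget' : ∀ t : Nat, t < arr.length →
        kq'.getD t 0 = if t = j.toNat then kq.getD i.toNat 0
          else if t = i.toNat then kq.getD j.toNat 0 else kq.getD t 0 := by
      intro t ht
      rw [hkq'def, PySem.List.pySetD_of_nonneg _ _ hj0, PySem.List.pySetD_of_nonneg _ _ hi0,
        PySem.List.pyGetD_of_nonneg _ _ hj0, PySem.List.pyGetD_of_nonneg _ _ hi0]
      have h1 : t < ((kq.set i.toNat (kq.getD j.toNat 0)).set j.toNat (kq.getD i.toNat 0)).length := by
        simp only [List.length_set]; omega
      have h3 : t < kq.length := by omega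
      rw [List.getD_eq_getElem _ _ h1, List.getElem_set, List.getElem_set]
      split_ifs <;> first | rfl | omega | exact (List.getD_eq_getElem _ _ h3).symm
    apply ih hlen' (by omega) (by omega) (by omega) _ k hk
    intro t ht
    rw [hget' t ht]
    by_cases e1 : t = j.toNat
    · rw [if_pos e1, hvi]
      have hc : t % 2 = 0 ∧ ((t : Int) < i + 2 ∨ j - 2 < (t : Int)) := by omega
      rw [if_pos hc]
      congr 1
      omega
    · by_cases e2 : t = i.toNat
      · rw [if_neg e1, if_pos e2, hvj]
        have hc : t % 2 = 0 ∧ ((t : Int) < i + 2 ∨ j - 2 < (t : Int)) := by omega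
        rw [if_pos hc]
        congr 1
        omega
      · rw [if_neg e1, if_neg e2, hkq t ht]
        by_cases hte : t % 2 = 0
        · have hiff : ((t:Int) < i ∨ j < (t:Int)) ↔ ((t:Int) < i + 2 ∨ j - 2 < (t:Int)) := by omega
          simp only [hte, true_and, hiff]
        · simp [hte]

theorem B_eq_spec (arr : List Int) : dao_nguoc_vtri_chan_alt arr = pvSpec arr := by
  unfold dao_nguoc_vtri_chan_alt
  dsimp only
  rcases Nat.eq_zero_or_pos arr.length with h0 | hpos
  · have harr : arr = [] := List.length_eq_zero_iff.mp h0
    subst harr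
    rw [pvSpec]
    simp only [List.length_nil]
    rw [pvSwapLoop]
    norm_num
  · set j : Int := if (arr.length % 2 == 1) = true then (arr.length : Int) - 1 else (arr.length : Int) - 2 with hj
    have hjval : j = (pvM arr.length : Int) := by
      rw [hj, pvM]
      by_cases h : arr.length % 2 = 1
      · simp [h]
        omega
      · simp [h]
        omega
    have hj2 : j % 2 = 0 := by
      rw [hjval, pvM]
      split_ifs with h <;> omega
    have hjn : j < (arr.length : Int) := by
      rw [hjval, pvM]
      split_ifs with h <;> omega
    have hev : ∀ k : Nat, k < arr.length → k % 2 = 0 → (k : Int) ≤ j := by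
      intro k hk hke
      rw [hjval, pvM]
      split_ifs with h <;> omega
    apply List.ext_getElem
    · rw [pvSwapLoop_length]
      simp [pvSpec]
    · intro k hk1 hk2
      have hkn : k < arr.length := by simpa [pvSwapLoop_length] using hk1
      have hchar := pvSwapLoop_char arr j hj2 hjn hev arr 0 j rfl le_rfl rfl (by omega)
        (by
          intro t ht
          have hnc : ¬ (t % 2 = 0 ∧ ((t : Int) < 0 ∨ j < (t : Int))) := by
            intro ⟨hte, hc⟩
            rcases hc with hc | hc
            · omega
            · exact absurd (hev t ht hte) (by omega)
          rw [if_neg hnc]) k hkn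
      have hlhs : (pvSwapLoop arr 0 j)[k] = (pvSwapLoop arr 0 j).getD k 0 :=
        (List.getD_eq_getElem _ _ hk1).symm
      rw [hlhs, hchar]
      simp only [pvSpec, List.getElem_map, List.getElem_range]
      by_cases hke : k % 2 = 0
      · rw [if_pos hke, if_pos hke]
        have hkm : (k : Int) ≤ j := hev k hkn hke
        have heq : (j - (k : Int)).toNat = pvM arr.length - k := by
          rw [hjval] at hkm ⊢
          omega
        rw [heq]
      · rw [if_neg hke, if_neg hke]

-- ---- A side ----

-- the tail of A's second loop from even index a, reading chan_rev at idx
def pvTail (c arr : List Int) (n : Nat) (idx : Int) (a : Nat) : List Int :=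
  if _h : a < n then
    PySem.List.pyGetD c idx 0 ::
      (if a + 1 < n then arr.getD (a + 1) 0 :: pvTail c arr n (idx + 1) (a + 2) else [])
  else []
termination_by n - a

theorem pvALoop (c arr : List Int) :
    ∀ (fuel a : Nat) (acc : List Int) (idx : Int), a % 2 = 0 → arr.length ≤ a + 2 * fuel →
    ((PySem.List.pyRange (a : Int) (arr.length : Int) 1).foldl
      (fun (st : List Int × Int) i =>
        if i % 2 == 0 then (st.1 ++ [PySem.List.pyGetD c st.2 0], st.2 + 1)
        else (st.1 ++ [PySem.List.pyGetD arr i 0], st.2)) (acc, idx)).1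
      = acc ++ pvTail c arr arr.length idx a := by
  intro fuel
  induction fuel with
  | zero =>
    intro a acc idx ha2 hfa
    rw [PySem.List.pyRange_one_eq_nil (by exact_mod_cast hfa)]
    rw [pvTail, dif_neg (by omega)]
    simp
  | succ fuel ih =>
    intro a acc idx ha2 hfa
    by_cases han : a < arr.length
    · rw [PySem.List.pyRange_one_cons (by exact_mod_cast han)]
      rw [List.foldl_cons]
      have he : ((a : Int) % 2 == 0) = true := by simp; omega
      rw [if_pos he]
      by_cases ha1 : a + 1 < arr.length
      · rw [PySem.List.pyRange_one_cons (show (a : Int) + 1 < (arr.length : Int) by exact_mod_cast ha1)]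
        rw [List.foldl_cons]
        have ho : (((a : Int) + 1) % 2 == 0) = false := by simp; omega
        rw [if_neg (by simp [ho])]
        have hcast : (a : Int) + 1 + 1 = ((a + 2 : Nat) : Int) := by push_cast; ring
        rw [hcast, ih (a + 2) _ (idx + 1) (by omega) (by omega)]
        conv_rhs => rw [pvTail]
        rw [dif_pos han, if_pos ha1]
        have hga : PySem.List.pyGetD arr ((a : Int) + 1) 0 = arr.getD (a + 1) 0 := by
          rw [show (a : Int) + 1 = ((a + 1 : Nat) : Int) by push_cast; ring]
          exact PySem.List.pyGetD_natCast arr (a + 1) 0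
        rw [hga]
        simp
      · rw [PySem.List.pyRange_one_eq_nil (show (arr.length : Int) ≤ (a : Int) + 1 by exact_mod_cast (by omega : arr.length ≤ a + 1))]
        rw [List.foldl_nil]
        conv_rhs => rw [pvTail]
        rw [dif_pos han, if_neg ha1]
    · rw [PySem.List.pyRange_one_eq_nil (by exact_mod_cast (by omega : arr.length ≤ a))]
      rw [pvTail, dif_neg han]
      simp

theorem pvTail_length_aux (c arr : List Int) (n : Nat) :
    ∀ (d a : Nat) (idx : Int), n - a ≤ d → (pvTail c arr n idx a).length = n - a := by
  intro d
  induction d with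
  | zero =>
    intro a idx h
    rw [pvTail, dif_neg (by omega)]
    simp
    omega
  | succ d ih =>
    intro a idx h
    by_cases ha : a < n
    · rw [pvTail, dif_pos ha]
      by_cases h1 : a + 1 < n
      · rw [if_pos h1]
        simp [ih (a + 2) (idx + 1) (by omega)]
        omega
      · rw [if_neg h1]
        simp
        omega
    · rw [pvTail, dif_neg ha]
      simp
      omega

theorem pvTail_length (c arr : List Int) (n : Nat) (idx : Int) (a : Nat) :
    (pvTail c arr n idx a).length = n - a :=
  pvTail_length_aux c arr n (n - a) a idx le_rfl

theorem pvTail_getD_aux (c arr : List Int) (n : Nat) :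
    ∀ (d a : Nat) (idx : Int), n - a ≤ d → a % 2 = 0 → ∀ t : Nat, t < n - a →
    (pvTail c arr n idx a).getD t 0 =
      if t % 2 = 0 then PySem.List.pyGetD c (idx + ((t / 2 : Nat) : Int)) 0 else arr.getD (a + t) 0 := by
  intro d
  induction d with
  | zero =>
    intro a idx h ha2 t ht
    omega
  | succ d ih =>
    intro a idx h ha2 t ht
    have ha : a < n := by omega
    by_cases h1 : a + 1 < n
    case neg =>
      have ht0 : t = 0 := by omega
      subst ht0
      rw [pvTail, dif_pos ha, if_neg h1]
      simp
    rw [pvTail, dif_pos ha, if_pos h1]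
    match t with
    | 0 => simp
    | 1 => simp
    | (s + 2) =>
      have hcons : ((PySem.List.pyGetD c idx 0) :: (arr.getD (a + 1) 0) ::
          pvTail c arr n (idx + 1) (a + 2)).getD (s + 2) 0
          = (pvTail c arr n (idx + 1) (a + 2)).getD s 0 := by
        simp [List.getD_cons_succ]
      rw [hcons, ih (a + 2) (idx + 1) (by omega) (by omega) s (by omega)]
      by_cases hse : s % 2 = 0
      · have he2 : (s + 2) % 2 = 0 := by omega
        rw [if_pos hse, if_pos he2]
        congr 1
        have hd : s / 2 + 1 = (s + 2) / 2 := by omega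
        push_cast [← hd]
        ring
      · have he2 : ¬ (s + 2) % 2 = 0 := by omega
        rw [if_neg hse, if_neg he2]
        congr 1
        omega

theorem pvTail_getD (c arr : List Int) (n : Nat) (idx : Int) (a : Nat)
    (ha2 : a % 2 = 0) (t : Nat) (ht : t < n - a) :
    (pvTail c arr n idx a).getD t 0 =
      if t % 2 = 0 then PySem.List.pyGetD c (idx + ((t / 2 : Nat) : Int)) 0 else arr.getD (a + t) 0 :=
  pvTail_getD_aux c arr n (n - a) a idx le_rfl ha2 t ht

-- even entries of pyRange 0 n are exactly the doubles of range ((n+1)/2)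
theorem pvFilter (n : Nat) :
    (PySem.List.pyRange 0 (n : Int) 1).filter (fun i => i % 2 == 0)
      = (List.range ((n + 1) / 2)).map (fun t => ((2 * t : Nat) : Int)) := by
  induction n with
  | zero =>
    rw [PySem.List.pyRange_one_eq_nil (by norm_num)]
    simp
  | succ n ih =>
    rw [show ((n + 1 : Nat) : Int) = (n : Int) + 1 by push_cast; ring]
    rw [PySem.List.pyRange_one_succ_right (by exact_mod_cast Nat.zero_le n)]
    rw [List.filter_append, ih]
    by_cases he : n % 2 = 0
    · have hfe : (((n : Int)) % 2 == 0) = true := by simp; omega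
      have hr : (n + 1 + 1) / 2 = (n + 1) / 2 + 1 := by omega
      rw [hr, List.range_succ, List.map_append]
      simp [hfe]
      omega
    · have hfo : (((n : Int)) % 2 == 0) = false := by simp; omega
      have hr : (n + 1 + 1) / 2 = (n + 1) / 2 := by omega
      rw [hr]
      simp [hfo]

theorem A_eq_spec (arr : List Int) : dao_nguoc_vtri_chan arr = pvSpec arr := by
  unfold dao_nguoc_vtri_chan
  dsimp only
  rw [PySem.List.foldl_append_if (fun i => i % 2 == 0) (fun i => PySem.List.pyGetD arr i 0)]
  rw [List.nil_append, pvFilter, List.map_map]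
  set E := (List.range ((arr.length + 1) / 2)).map
      ((fun i => PySem.List.pyGetD arr i 0) ∘ fun t => ((2 * t : Nat) : Int)) with hE
  have hEget : ∀ s : Nat, s < (arr.length + 1) / 2 → E.getD s 0 = arr.getD (2 * s) 0 := by
    intro s hs
    rw [hE, List.getD_eq_getElem _ _ (by simpa using hs), List.getElem_map, List.getElem_range]
    simp only [Function.comp_apply, PySem.List.pyGetD_natCast]
  have hElen : E.length = (arr.length + 1) / 2 := by rw [hE]; simp
  have hL := pvALoop E.reverse arr arr.length 0 [] 0 (by omega) (by omega)
  rw [Nat.cast_zero] at hL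
  rw [hL, List.nil_append]
  apply List.ext_getElem
  · rw [pvTail_length]
    simp [pvSpec]
  · intro k hk1 hk2
    have hkn : k < arr.length := by
      rw [pvTail_length] at hk1
      omega
    rw [← List.getD_eq_getElem _ 0 hk1]
    rw [pvTail_getD E.reverse arr arr.length 0 0 (by omega) k (by omega)]
    simp only [pvSpec, List.getElem_map, List.getElem_range]
    by_cases hke : k % 2 = 0
    · rw [if_pos hke, if_pos hke]
      have hs : k / 2 < E.length := by omega
      have hsrev : k / 2 < E.reverse.length := by simpa using hs
      rw [show (0 : Int) + ((k / 2 : Nat) : Int) = ((k / 2 : Nat) : Int) by ring]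
      rw [PySem.List.pyGetD_natCast]
      rw [List.getD_eq_getElem _ _ hsrev, List.getElem_reverse]
      rw [← List.getD_eq_getElem _ 0 (by omega : E.length - 1 - k / 2 < E.length)]
      rw [hEget (E.length - 1 - k / 2) (by omega)]
      congr 1
      rw [pvM]
      split_ifs with h <;> omega
    · rw [if_neg hke, if_neg hke]
      rw [Nat.zero_add]

-- ===== VERDICT (by name: the statement is the Claim_ definition above) =====
theorem dao_nguoc_vtri_chan_spec : Claim_equal_dao_nguoc_vtri_chan := by
  intro arr _
  unfold Spec_dao_nguoc_vtri_chan
  rw [A_eq_spec, B_eq_spec]
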